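-- pv_equiv track=rewrite | github.com/LimitedInfo/Live-Sports-Trader | src/repository.py | get_team_token_from_tokens
-- ===== SOURCE A (Python) =====
-- def get_team_token_from_tokens(tokens_data, team_name):
--     if not tokens_data:
--         return None
--
--     for token in tokens_data:
--         if token.get('outcome', '').lower() == team_name.lower():
--             return token
--
--     for token in tokens_data:
--         if team_name.lower() in token.get('outcome', '').lower():
--             return token
--
--     return None
-- ===== SOURCE B (Python) =====
-- def get_team_token_from_tokens(tokens_data, team_name):
--     team_lower = team_name.lower()
--     substring_match = None
--     for token in tokens_data:
--         outcome = token.get('outcome', '').lower()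
--         if outcome == team_lower:
--             return token
--         if substring_match is None and team_lower in outcome:
--             substring_match = token
--     return substring_match
-- ===== Notes on version B (the rewrite author's own statement) =====
-- stated objective: faster
-- what changed: Replaces A's two full passes (exact pass then substring pass, lowering team_name and each outcome twice) with a single pass that lowers team_name once and tracks the first substring match while returning immediately on an exact match.
import Mathlib
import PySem

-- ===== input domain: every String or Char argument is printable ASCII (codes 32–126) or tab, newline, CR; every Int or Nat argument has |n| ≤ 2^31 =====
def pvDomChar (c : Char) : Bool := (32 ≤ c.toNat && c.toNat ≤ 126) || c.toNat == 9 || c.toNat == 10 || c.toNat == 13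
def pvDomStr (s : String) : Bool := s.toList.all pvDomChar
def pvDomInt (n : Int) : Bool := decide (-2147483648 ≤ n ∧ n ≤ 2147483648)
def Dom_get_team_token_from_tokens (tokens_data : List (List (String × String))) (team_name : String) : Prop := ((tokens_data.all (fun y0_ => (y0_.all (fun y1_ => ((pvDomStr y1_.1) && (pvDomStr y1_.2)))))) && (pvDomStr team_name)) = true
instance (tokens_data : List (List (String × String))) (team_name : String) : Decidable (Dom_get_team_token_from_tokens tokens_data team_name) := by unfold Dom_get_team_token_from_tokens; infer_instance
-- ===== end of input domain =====

-- B replaces A's two passes by one pass that lowers team_name once and keeps the first substring match; objective: faster (constant factor).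

-- token.get('outcome', '') : first-match lookup on the association list (exact: Python dict keys are unique)
def pvTokOutcome (token : List (String × String)) : String :=
  (PySem.Dict.mk token).getD "outcome" ""

-- ===== PORT A =====
-- first loop of A: exact (lowercased) equality
def pvALoop1 (team_name : String) : List (List (String × String)) → Option (List (String × String))
  | [] => none
  | t :: rest =>
    if PySem.Str.lower (pvTokOutcome t) = PySem.Str.lower team_name then some t
    else pvALoop1 team_name rest

-- second loop of A: substring containment
def pvALoop2 (team_name : String) : List (List (String × String)) → Option (List (String × String))
  | [] => none
  | t :: rest =>
    if PySem.Str.isIn (PySem.Str.lower team_name) (PySem.Str.lower (pvTokOutcome t)) then some t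
    else pvALoop2 team_name rest

def get_team_token_from_tokens (tokens_data : List (List (String × String))) (team_name : String) : Option (List (String × String)) :=
  if tokens_data = [] then none
  else
    match pvALoop1 team_name tokens_data with
    | some t => some t
    | none => pvALoop2 team_name tokens_data

-- ===== PORT B =====
-- single pass: return on exact match, remember the first substring match
def pvBLoop (team_lower : String) : List (List (String × String)) → Option (List (String × String)) → Option (List (String × String))
  | [], substring_match => substring_match
  | t :: rest, substring_match =>
    let outcome := PySem.Str.lower (pvTokOutcome t)
    if outcome = team_lower then some t
    else pvBLoop team_lower rest
      (if substring_match = none ∧ PySem.Str.isIn team_lower outcome then some t else substring_match)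

def get_team_token_from_tokens_alt (tokens_data : List (List (String × String))) (team_name : String) : Option (List (String × String)) :=
  pvBLoop (PySem.Str.lower team_name) tokens_data none

-- ===== PRECONDITION & SPEC =====
def Spec_get_team_token_from_tokens (tokens_data : List (List (String × String))) (team_name : String) (out : Option (List (String × String))) : Prop := out = get_team_token_from_tokens_alt tokens_data team_name
instance (tokens_data : List (List (String × String))) (team_name : String) (out : Option (List (String × String))) : Decidable (Spec_get_team_token_from_tokens tokens_data team_name out) := by unfold Spec_get_team_token_from_tokens; infer_instance

-- ===== CLAIM (what is proved, stated in full; the proofs are below) =====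
def Claim_equal_get_team_token_from_tokens : Prop := ∀ (tokens_data : List (List (String × String))) (team_name : String), Dom_get_team_token_from_tokens tokens_data team_name → Spec_get_team_token_from_tokens tokens_data team_name (get_team_token_from_tokens tokens_data team_name)

-- ===== LEMMAS AND PROOFS =====
theorem pvBLoop_eq (team_name : String) (tokens : List (List (String × String)))
    (sm : Option (List (String × String))) :
    pvBLoop (PySem.Str.lower team_name) tokens sm =
      match pvALoop1 team_name tokens with
      | some t => some t
      | none =>
        match sm with
        | some s => some s
        | none => pvALoop2 team_name tokens := by
  induction tokens generalizing sm with
  | nil => cases sm <;> simp [pvBLoop, pvALoop1, pvALoop2]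
  | cons t rest ih =>
    simp only [pvBLoop, pvALoop1, pvALoop2]
    by_cases hx : PySem.Str.lower (pvTokOutcome t) = PySem.Str.lower team_name
    · simp [hx]
    · simp only [hx, if_false, ih]
      cases h1 : pvALoop1 team_name rest with
      | some u => cases sm <;> simp
      | none =>
        cases sm with
        | some s => simp
        | none =>
            by_cases hin : PySem.Chars.isIn (PySem.Chars.lower team_name.toList)
                (PySem.Chars.lower (pvTokOutcome t).toList) = true <;> simp [hin]

-- ===== VERDICT (by name: the statement is the Claim_ definition above) =====
theorem get_team_token_from_tokens_spec : Claim_equal_get_team_token_from_tokens := by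
  intro tokens_data team_name _
  unfold Spec_get_team_token_from_tokens get_team_token_from_tokens get_team_token_from_tokens_alt
  rw [pvBLoop_eq]
  cases tokens_data with
  | nil => simp [pvALoop1, pvALoop2]
  | cons t rest => simp
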